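-- pv_equiv track=rewrite | github.com/rafalopez79/quines | aoc/advent6.py | process2
-- ===== SOURCE A (Python) =====
-- from typing import List, NoReturn, Tuple, Set
--
-- def process2(data: List[List[str]]) -> List[Set[str]]:
--     out: List[Set[str]] = []
--     for item in data:
--         l: List[str] = []
--         for elements in item:
--             l.extend(elements)
--         s:Set[str] = set(l)
--         for elements in item:
--             s = s.intersection(set(elements))
--         out.append(s)
--     return out
-- ===== SOURCE B (Python) =====
-- from typing import List, Set
--
--
-- def process2(data: List[List[str]]) -> List[Set[str]]:
--     out: List[Set[str]] = []
--     for item in data: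
--         counts = {}
--         for elements in item:
--             for c in set(elements):
--                 counts[c] = counts.get(c, 0) + 1
--         out.append({c for c, n in counts.items() if n == len(item)})
--     return out
-- ===== Notes on version B (the rewrite author's own statement) =====
-- stated objective: alternative
-- what changed: Instead of concatenating all strings, building one big set and folding set.intersection over every string's set, B makes a single pass keeping a frequency table of per-string distinct characters and keeps exactly the characters whose count equals the group size.
import Mathlib
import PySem

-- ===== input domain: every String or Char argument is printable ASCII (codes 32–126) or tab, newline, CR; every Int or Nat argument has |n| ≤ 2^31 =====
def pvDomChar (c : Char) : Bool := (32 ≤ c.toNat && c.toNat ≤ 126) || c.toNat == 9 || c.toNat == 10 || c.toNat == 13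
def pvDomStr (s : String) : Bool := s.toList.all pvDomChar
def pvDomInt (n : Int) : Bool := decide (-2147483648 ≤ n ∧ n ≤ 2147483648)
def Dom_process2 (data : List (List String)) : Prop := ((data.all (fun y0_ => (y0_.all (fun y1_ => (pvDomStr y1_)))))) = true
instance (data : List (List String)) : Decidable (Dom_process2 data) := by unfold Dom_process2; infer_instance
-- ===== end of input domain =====

-- B replaces A's build-big-set-then-fold-intersections per group by one counting pass over each
-- string's distinct characters plus a final count==group-size filter (alternative algorithm, same cost).
-- Python iterates a string as its characters (1-char strings):
def pvChars (e : String) : List String := e.toList.map (fun c => String.ofList [c])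

-- ===== PORT A =====
-- the body of A's 'for item in data' loop
def pvGroupA (item : List String) : List String :=
  let l : List String := item.foldl (fun acc e => acc ++ pvChars e) []
  let s0 : PySem.Set String := PySem.Set.ofList l
  item.foldl (fun s e => PySem.Set.inter s (PySem.Set.ofList (pvChars e))) s0

def process2 (data : List (List String)) : List (List String) :=
  data.foldl (fun out item => out ++ [pvGroupA item]) []

-- ===== PORT B =====
-- the frequency table of B's inner loops: counts[c] = counts.get(c, 0) + 1 over each string's distinct chars
def pvCounts (item : List String) : PySem.Dict String Int :=
  item.foldl
    (fun d e => (PySem.Set.ofList (pvChars e)).foldl (fun d c => d.modify c 0 (· + 1)) d)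
    PySem.Dict.empty

-- '{c for c, n in counts.items() if n == len(item)}'
def pvGroupB (item : List String) : List String :=
  (((pvCounts item).items.filter (fun p => p.2 == (item.length : Int))).map (·.1))

def process2_alt (data : List (List String)) : List (List String) :=
  data.map pvGroupB

-- ===== PRECONDITION & SPEC =====
def Spec_process2 (data : List (List String)) (out : List (List String)) : Prop := out = process2_alt data
instance (data : List (List String)) (out : List (List String)) : Decidable (Spec_process2 data out) := by unfold Spec_process2; infer_instance

-- ===== CLAIM (what is proved, stated in full; the proofs are below) =====
def Claim_equal_process2 : Prop := ∀ (data : List (List String)), Dom_process2 data → Spec_process2 data (process2 data)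

-- ===== LEMMAS AND PROOFS =====

-- updating a set with x already present ignores every later occurrence of x
theorem pv_update_discard {α : Type} [BEq α] [LawfulBEq α] (x : α) (l : List α) (s : PySem.Set α)
    (hx : x ∈ s) : PySem.Set.update s (PySem.Set.discard l x) = PySem.Set.update s l := by
  induction l generalizing s with
  | nil => rfl
  | cons y t ih =>
    by_cases h : y = x
    · subst h
      rw [PySem.Set.update_cons, PySem.Set.add_of_mem hx,
        show PySem.Set.discard (y :: t) y = PySem.Set.discard t y from by simp [PySem.Set.discard],
        ih s hx]
    · have : PySem.Set.discard (y :: t) x = y :: PySem.Set.discard t x := by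
        simp [PySem.Set.discard, h]
      rw [this, PySem.Set.update_cons, PySem.Set.update_cons]
      exact ih _ (by rw [PySem.Set.mem_add]; exact Or.inl hx)

-- s.update(set(xs)) = s.update(xs)
theorem pv_update_ofList {α : Type} [BEq α] [LawfulBEq α] (xs : List α) (s : PySem.Set α) :
    PySem.Set.update s (PySem.Set.ofList xs) = PySem.Set.update s xs := by
  induction xs generalizing s with
  | nil => rfl
  | cons x t ih =>
    rw [PySem.Set.ofList_cons, PySem.Set.update_cons, PySem.Set.update_cons,
      pv_update_discard x _ _ (by rw [PySem.Set.mem_add]; exact Or.inr rfl), ih]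

-- the counter's keys are the distinct chars of the group, in first-occurrence order
theorem pvCounts_keys (item : List String) :
    (pvCounts item).keys = PySem.Set.ofList (item.flatMap pvChars) := by
  have h : ∀ (it : List String) (d : PySem.Dict String Int),
      (it.foldl (fun d e => (PySem.Set.ofList (pvChars e)).foldl (fun d c => d.modify c 0 (· + 1)) d) d).keys
        = PySem.Set.update d.keys (it.flatMap pvChars) := by
    intro it
    induction it with
    | nil => intro d; rfl
    | cons e t ih =>
      intro d
      rw [List.foldl_cons, ih, PySem.Dict.keys_foldl_modify, pv_update_ofList,
        List.flatMap_cons, ← PySem.Set.update_append]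
  rw [pvCounts, h, PySem.Dict.keys_empty, PySem.Set.update_nil_left]

-- the counter's value at c counts the strings whose (distinct) chars contain c
theorem pvCounts_getD (item : List String) (c : String) :
    (pvCounts item).getD c 0
      = (item.countP (fun e => PySem.Set.contains (PySem.Set.ofList (pvChars e)) c) : Int) := by
  have h : ∀ (it : List String) (d : PySem.Dict String Int),
      (it.foldl (fun d e => (PySem.Set.ofList (pvChars e)).foldl (fun d c => d.modify c 0 (· + 1)) d) d).getD c 0
        = d.getD c 0 + (it.countP (fun e => PySem.Set.contains (PySem.Set.ofList (pvChars e)) c) : Int) := by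
    intro it
    induction it with
    | nil => intro d; simp
    | cons e t ih =>
      intro d
      rw [List.foldl_cons, ih, PySem.Dict.getD_foldl_modify_add_one, List.countP_cons]
      by_cases hc : c ∈ PySem.Set.ofList (pvChars e)
      · have hm : c ∈ pvChars e := (PySem.List.mem_dedup (pvChars e) c).mp hc
        rw [List.count_eq_one_of_mem (PySem.Set.nodup_ofList (xs := pvChars e)) hc]
        simp [hm]; ring
      · have hm : c ∉ pvChars e := fun h => hc ((PySem.List.mem_dedup (pvChars e) c).mpr h)
        rw [List.count_eq_zero_of_not_mem hc]
        simp [hm]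
  rw [pvCounts, h, PySem.Dict.getD_empty]; simp

-- A's fold of intersections is one filter over the start set
theorem pv_foldl_inter (item : List String) (s : PySem.Set String) :
    item.foldl (fun s e => PySem.Set.inter s (PySem.Set.ofList (pvChars e))) s
      = s.filter (fun c => item.all (fun e => PySem.Set.contains (PySem.Set.ofList (pvChars e)) c)) := by
  induction item generalizing s with
  | nil => simp
  | cons e t ih =>
    rw [List.foldl_cons, ih, PySem.Set.inter, List.filter_filter]
    refine List.filter_congr fun a _ => ?_
    rw [List.all_cons]
    exact Bool.and_comm _ _

-- per-group agreement of the two algorithms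
theorem pvGroup_eq (item : List String) : pvGroupA item = pvGroupB item := by
  have hnd : (pvCounts item).keys.Nodup := by
    rw [pvCounts_keys]; exact PySem.Set.nodup_ofList (xs := List.flatMap pvChars item)
  have hitems := PySem.Dict.items_eq_map_keys (pvCounts item) hnd 0
  rw [pvGroupA, pvGroupB, hitems, pvCounts_keys]
  rw [PySem.List.foldl_append_eq_flatMap, List.nil_append, pv_foldl_inter]
  simp only [List.filter_map, List.map_map, Function.comp_def]
  simp only [List.map_id']
  apply List.filter_congr
  intro c _
  rw [pvCounts_getD]
  by_cases h : ∀ e ∈ item, PySem.Set.contains (PySem.Set.ofList (pvChars e)) c = true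
  · have h1 := List.all_eq_true.mpr h
    have h2 := List.countP_eq_length.mpr h
    rw [h1, h2]; simp
  · have h1 : (item.all fun e => PySem.Set.contains (PySem.Set.ofList (pvChars e)) c) = false :=
      Bool.eq_false_iff.mpr fun hh => h (List.all_eq_true.mp hh)
    have h2 : item.countP (fun e => PySem.Set.contains (PySem.Set.ofList (pvChars e)) c) ≠ item.length :=
      fun he => h (List.countP_eq_length.mp he)
    rw [h1]
    symm
    rw [beq_eq_false_iff_ne]
    exact fun he => h2 (by exact_mod_cast he)

-- ===== VERDICT (by name: the statement is the Claim_ definition above) =====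
theorem process2_spec : Claim_equal_process2 := by
  intro data _
  show process2 data = process2_alt data
  rw [process2, process2_alt, PySem.List.foldl_append_singleton_eq_map, List.nil_append]
  exact List.map_congr_left fun item _ => pvGroup_eq item
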